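-- pv_equiv track=rewrite | github.com/helperfunc/code | leetcode/dynamic_programming/linear/651. 4 Keys Keyboard/solution.py | maxA
-- ===== SOURCE A (Python) =====
-- def maxA(n: int) -> int:
--     if n < 4:
--         return n
--
--     length = [0] * (n + 1)
--     for i in range(4):
--         length[i] = i
--
--     for i in range(4, n + 1):
--         length[i] = length[i - 1] + 1 # the ith pos is A
--         for k in range(1, i):
--             length[i] = max(length[i], length[k] * (i - k -1))
--
--     return length[n]
-- ===== SOURCE B (Python) =====
-- def maxA(n: int) -> int:
--     if n < 4:
--         return n
--     dp = [0, 1, 2, 3]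
--     for i in range(4, n + 1):
--         best = dp[i - 1] + 1
--         for k in range(max(1, i - 7), i):
--             best = max(best, dp[k] * (i - k - 1))
--         dp.append(best)
--     return dp[n]
-- ===== Notes on version B (the rewrite author's own statement) =====
-- stated objective: faster
-- what changed: B replaces A's quadratic DP (inner max over every earlier breakpoint) by a linear-time DP whose inner transition only inspects the last seven breakpoints, justified by a domination argument (five keystrokes later the dp value has at least quadrupled).
import Mathlib
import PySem

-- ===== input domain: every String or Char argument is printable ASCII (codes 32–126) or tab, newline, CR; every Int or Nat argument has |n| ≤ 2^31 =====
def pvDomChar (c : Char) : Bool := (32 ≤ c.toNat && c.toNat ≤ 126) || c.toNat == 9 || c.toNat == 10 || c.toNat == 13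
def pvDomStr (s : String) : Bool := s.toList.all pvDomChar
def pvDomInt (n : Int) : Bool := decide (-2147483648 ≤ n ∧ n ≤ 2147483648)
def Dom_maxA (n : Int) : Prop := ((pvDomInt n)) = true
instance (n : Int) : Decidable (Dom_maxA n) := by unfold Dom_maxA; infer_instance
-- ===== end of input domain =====

-- B speeds A up asymptotically: its inner max only needs the last seven breakpoints.

-- ===== PORT A =====
def maxA (n : Int) : Int :=
  if n < 4 then n
  else
    let length0 : List Int := List.replicate (n + 1).toNat 0
    let length1 := (PySem.List.pyRange 0 4 1).foldl
      (fun l i => PySem.List.pySetD l i i) length0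
    let length2 := (PySem.List.pyRange 4 (n + 1) 1).foldl
      (fun l i =>
        let l1 := PySem.List.pySetD l i (PySem.List.pyGetD l (i - 1) 0 + 1)
        (PySem.List.pyRange 1 i 1).foldl
          (fun l2 k =>
            PySem.List.pySetD l2 i
              (max (PySem.List.pyGetD l2 i 0) (PySem.List.pyGetD l2 k 0 * (i - k - 1)))) l1)
      length1
    PySem.List.pyGetD length2 n 0

-- ===== PORT B =====
def maxA_alt (n : Int) : Int :=
  if n < 4 then n
  else
    let dp := (PySem.List.pyRange 4 (n + 1) 1).foldl
      (fun dp i =>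
        let best := PySem.List.pyGetD dp (i - 1) 0 + 1
        let best := (PySem.List.pyRange (max 1 (i - 7)) i 1).foldl
          (fun best k => max best (PySem.List.pyGetD dp k 0 * (i - k - 1))) best
        dp ++ [best]) [0, 1, 2, 3]
    PySem.List.pyGetD dp n 0

-- ===== PRECONDITION & SPEC =====
def Spec_maxA (n : Int) (out : Int) : Prop := out = maxA_alt n
instance (n : Int) (out : Int) : Decidable (Spec_maxA n out) := by unfold Spec_maxA; infer_instance

-- ===== CLAIM (what is proved, stated in full; the proofs are below) =====
def Claim_equal_maxA : Prop := ∀ (n : Int), Dom_maxA n → Spec_maxA n (maxA n)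

-- ===== LEMMAS AND PROOFS =====

-- Reference dp functions (proof-only helpers).
def pvInner (f : Nat → Int) (lo i : Nat) : Int :=
  (List.range' lo (i - lo)).foldl (fun acc k => max acc (f k * ((i : Int) - (k : Int) - 1))) (f (i - 1) + 1)

def pvTblA : Nat → List Int
  | 0 => [0]
  | m + 1 =>
    pvTblA m ++ [if m + 1 < 4 then ((m : Int) + 1)
                 else pvInner (fun k => (pvTblA m).getD k 0) 1 (m + 1)]

def pvA (i : Nat) : Int := (pvTblA i).getD i 0

def pvTblB : Nat → List Int
  | 0 => [0]
  | m + 1 =>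
    pvTblB m ++ [if m + 1 < 4 then ((m : Int) + 1)
                 else pvInner (fun k => (pvTblB m).getD k 0) (max 1 (m + 1 - 7)) (m + 1)]

def pvB (i : Nat) : Int := (pvTblB i).getD i 0


-- ---- small List.getD helpers ----
theorem pv_getD_append {l l' : List Int} {n : Nat} (d : Int) (h : n < l.length) :
    (l ++ l').getD n d = l.getD n d := by
  simp [List.getD_eq_getElem?_getD, List.getElem?_append_left h]

theorem pv_getD_append_len (l l' : List Int) (d : Int) :
    (l ++ l').getD l.length d = l'.getD 0 d := by
  simp [List.getD_eq_getElem?_getD, List.getElem?_append_right (le_refl l.length)]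

theorem pv_getD_set_self {l : List Int} {i : Nat} (h : i < l.length) (v : Int) :
    (l.set i v).getD i 0 = v := by
  simp [List.getD_eq_getElem?_getD, h]

theorem pv_getD_set_ne {l : List Int} {i j : Nat} (h : i ≠ j) (v : Int) :
    (l.set i v).getD j 0 = l.getD j 0 := by
  simp [List.getD_eq_getElem?_getD, List.getElem?_set_ne h]

theorem pv_set_getD_self {l : List Int} {i : Nat} (h : i < l.length) :
    l.set i (l.getD i 0) = l := by
  simp [List.getD_eq_getElem?_getD, List.getElem?_eq_getElem h, List.set_getElem_self]

theorem pv_foldl_max_le {α : Type} (xs : List α) (f : α → Int) (c : Int) :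
    ∀ init, init ≤ c → (∀ x ∈ xs, f x ≤ c) →
    xs.foldl (fun acc x => max acc (f x)) init ≤ c := by
  induction xs with
  | nil => intro init h0 _; simpa using h0
  | cons x xs ih =>
    intro init h0 h
    simp only [List.foldl_cons]
    exact ih _ (max_le h0 (h x (by simp))) (fun y hy => h y (by simp [hy]))

-- ---- table facts ----
theorem pv_len_tblA (m : Nat) : (pvTblA m).length = m + 1 := by
  induction m with
  | zero => rfl
  | succ m ih => simp [pvTblA, ih]

theorem pv_len_tblB (m : Nat) : (pvTblB m).length = m + 1 := by
  induction m with
  | zero => rfl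
  | succ m ih => simp [pvTblB, ih]

theorem pv_tblA_getD {k m : Nat} (h : k ≤ m) : (pvTblA m).getD k 0 = pvA k := by
  induction m with
  | zero => interval_cases k; rfl
  | succ m ih =>
    rcases Nat.lt_or_ge k (m + 1) with hk | hk
    · rw [pvTblA, pv_getD_append _ (by rw [pv_len_tblA]; omega)]
      exact ih (by omega)
    · have hkm : k = m + 1 := by omega
      subst hkm; rfl

theorem pv_tblB_getD {k m : Nat} (h : k ≤ m) : (pvTblB m).getD k 0 = pvB k := by
  induction m with
  | zero => interval_cases k; rfl
  | succ m ih =>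
    rcases Nat.lt_or_ge k (m + 1) with hk | hk
    · rw [pvTblB, pv_getD_append _ (by rw [pv_len_tblB]; omega)]
      exact ih (by omega)
    · have hkm : k = m + 1 := by omega
      subst hkm; rfl

theorem pvInner_congr {f g : Nat → Int} {lo i : Nat} (h1 : 1 ≤ i)
    (h : ∀ k < i, f k = g k) : pvInner f lo i = pvInner g lo i := by
  unfold pvInner
  rw [h (i - 1) (by omega)]
  apply PySem.List.foldl_congr_mem
  intro acc k hk
  rw [List.mem_range'_1] at hk
  rw [h k (by omega)]

theorem pvA_small {i : Nat} (h : i < 4) : pvA i = i := by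
  interval_cases i <;> decide

theorem pvB_small {i : Nat} (h : i < 4) : pvB i = i := by
  interval_cases i <;> decide

theorem pvA_eq {i : Nat} (h : 4 ≤ i) : pvA i = pvInner pvA 1 i := by
  obtain ⟨m, rfl⟩ : ∃ m, i = m + 1 := ⟨i - 1, by omega⟩
  show (pvTblA (m + 1)).getD (m + 1) 0 = _
  rw [pvTblA]
  have hx : (pvTblA m ++ [if m + 1 < 4 then ((m : Int) + 1)
      else pvInner (fun k => (pvTblA m).getD k 0) 1 (m + 1)]).getD (m + 1) 0
      = (if m + 1 < 4 then ((m : Int) + 1)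
      else pvInner (fun k => (pvTblA m).getD k 0) 1 (m + 1)) := by
    rw [show m + 1 = (pvTblA m).length from (pv_len_tblA m).symm, pv_getD_append_len]
    rfl
  rw [hx, if_neg (by omega)]
  exact pvInner_congr (by omega) (fun k hk => pv_tblA_getD (by omega))

theorem pvB_eq {i : Nat} (h : 4 ≤ i) : pvB i = pvInner pvB (max 1 (i - 7)) i := by
  obtain ⟨m, rfl⟩ : ∃ m, i = m + 1 := ⟨i - 1, by omega⟩
  show (pvTblB (m + 1)).getD (m + 1) 0 = _
  rw [pvTblB]
  have hx : (pvTblB m ++ [if m + 1 < 4 then ((m : Int) + 1)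
      else pvInner (fun k => (pvTblB m).getD k 0) (max 1 (m + 1 - 7)) (m + 1)]).getD (m + 1) 0
      = (if m + 1 < 4 then ((m : Int) + 1)
      else pvInner (fun k => (pvTblB m).getD k 0) (max 1 (m + 1 - 7)) (m + 1)) := by
    rw [show m + 1 = (pvTblB m).length from (pv_len_tblB m).symm, pv_getD_append_len]
    rfl
  rw [hx, if_neg (by omega)]
  exact pvInner_congr (by omega) (fun k hk => pv_tblB_getD (by omega))

-- ---- arithmetic facts about the dp values ----
theorem pvA_step {i : Nat} (h : 4 ≤ i) : pvA (i - 1) + 1 ≤ pvA i := by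
  rw [pvA_eq h]
  unfold pvInner
  exact (PySem.List.le_foldl_max_int _ _ _).1

theorem pvA_nonneg : ∀ i, 0 ≤ pvA i := by
  intro i
  induction i using Nat.strong_induction_on with
  | _ i ih =>
    rcases Nat.lt_or_ge i 4 with h | h
    · rw [pvA_small h]; exact_mod_cast Nat.zero_le i
    · have h1 := pvA_step h
      have h2 := ih (i - 1) (by omega)
      omega

theorem pvA_grow {k : Nat} (hk : 1 ≤ k) : 4 * pvA k ≤ pvA (k + 5) := by
  conv_rhs => rw [pvA_eq (show 4 ≤ k + 5 by omega)]
  unfold pvInner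
  have hmem : k ∈ List.range' 1 (k + 5 - 1) := by rw [List.mem_range'_1]; omega
  have h2 := (PySem.List.le_foldl_max_int (List.range' 1 (k + 5 - 1))
      (fun k' => pvA k' * (((k + 5 : Nat) : Int) - (k' : Int) - 1)) (pvA (k + 5 - 1) + 1)).2 k hmem
  have hc : ((k + 5 : Nat) : Int) - (k : Int) - 1 = 4 := by push_cast; ring
  rw [hc] at h2
  linarith

theorem pv_cand_le (i k : Nat) (hi : 4 ≤ i) (hk1 : 1 ≤ k) (hki : k < i) :
    pvA k * ((i : Int) - (k : Int) - 1) ≤ pvInner pvA (max 1 (i - 7)) i := by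
  by_cases hw : i ≤ k + 7
  · unfold pvInner
    exact (PySem.List.le_foldl_max_int _ _ _).2 k (by rw [List.mem_range'_1]; omega)
  · have h5 : k + 5 < i := by omega
    have hrec := pv_cand_le i (k + 5) hi (by omega) h5
    have hg := pvA_grow hk1
    have hnn := pvA_nonneg k
    have hm : (8 : Int) ≤ (i : Int) - (k : Int) := by omega
    have hstep : pvA k * ((i : Int) - (k : Int) - 1)
        ≤ pvA (k + 5) * ((i : Int) - ((k + 5 : Nat) : Int) - 1) := by
      have he : (i : Int) - ((k + 5 : Nat) : Int) - 1 = (i : Int) - (k : Int) - 6 := by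
        push_cast; ring
      rw [he]
      calc pvA k * ((i : Int) - (k : Int) - 1)
          ≤ (4 * pvA k) * ((i : Int) - (k : Int) - 6) := by nlinarith
        _ ≤ pvA (k + 5) * ((i : Int) - (k : Int) - 6) := by
            apply mul_le_mul_of_nonneg_right hg; omega
    exact hstep.trans hrec
termination_by i - k

theorem pv_window_eq {i : Nat} (h : 4 ≤ i) :
    pvInner pvA 1 i = pvInner pvA (max 1 (i - 7)) i := by
  apply le_antisymm
  · unfold pvInner
    apply pv_foldl_max_le
    · exact (PySem.List.le_foldl_max_int _ _ _).1
    · intro k hk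
      rw [List.mem_range'_1] at hk
      exact pv_cand_le i k h (by omega) (by omega)
  · unfold pvInner
    apply pv_foldl_max_le
    · exact (PySem.List.le_foldl_max_int _ _ _).1
    · intro k hk
      rw [List.mem_range'_1] at hk
      exact (PySem.List.le_foldl_max_int _ _ _).2 k (by rw [List.mem_range'_1]; omega)

theorem pvA_eq_pvB : ∀ i, pvA i = pvB i := by
  intro i
  induction i using Nat.strong_induction_on with
  | _ i ih =>
    rcases Nat.lt_or_ge i 4 with h | h
    · rw [pvA_small h, pvB_small h]
    · rw [pvA_eq h, pvB_eq h, pv_window_eq h]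
      exact pvInner_congr (by omega) (fun k hk => ih k hk)

-- ---- bridge: pyRange to List.range' ----
theorem pv_pyRange_map (a b : Int) (ha : 0 ≤ a) :
    PySem.List.pyRange a b 1 = (List.range' a.toNat (b - a).toNat).map (fun k : Nat => (k : Int)) := by
  rw [PySem.List.pyRange_one, List.range'_eq_map_range, List.map_map]
  apply List.map_congr_left
  intro x hx
  simp only [Function.comp_apply]
  omega

-- ---- port B = pvTblB ----
theorem pv_B_step (m : Nat) (h3 : 3 ≤ m) :
    pvTblB m ++ [(PySem.List.pyRange (max 1 (((m + 1 : Nat) : Int) - 7)) ((m + 1 : Nat) : Int) 1).foldl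
        (fun best k => max best (PySem.List.pyGetD (pvTblB m) k 0 * (((m + 1 : Nat) : Int) - k - 1)))
        (PySem.List.pyGetD (pvTblB m) (((m + 1 : Nat) : Int) - 1) 0 + 1)]
    = pvTblB (m + 1) := by
  rw [show pvTblB (m + 1) = pvTblB m ++ [if m + 1 < 4 then ((m : Int) + 1)
      else pvInner (fun k => (pvTblB m).getD k 0) (max 1 (m + 1 - 7)) (m + 1)] from rfl]
  rw [if_neg (by omega)]
  congr 1
  rw [show (((m + 1 : Nat) : Int) - 1) = ((m : Nat) : Int) from by push_cast; ring,
      PySem.List.pyGetD_natCast]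
  rw [pv_pyRange_map _ _ (by omega), List.foldl_map]
  unfold pvInner
  rw [show (max 1 (((m + 1 : Nat) : Int) - 7)).toNat = max 1 (m + 1 - 7) from by omega]
  rw [show (((m + 1 : Nat) : Int) - (max 1 (((m + 1 : Nat) : Int) - 7))).toNat
      = (m + 1) - max 1 (m + 1 - 7) from by omega]
  rw [show (m + 1) - 1 = m from by omega]
  congr 1
  apply PySem.List.foldl_congr_mem
  intro acc k hk
  rw [PySem.List.pyGetD_natCast]

theorem pv_B_loop (m : Nat) (h3 : 3 ≤ m) :
    (PySem.List.pyRange 4 ((m : Int) + 1) 1).foldl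
      (fun dp i => dp ++ [(PySem.List.pyRange (max 1 (i - 7)) i 1).foldl
          (fun best k => max best (PySem.List.pyGetD dp k 0 * (i - k - 1)))
          (PySem.List.pyGetD dp (i - 1) 0 + 1)])
      [0, 1, 2, 3]
    = pvTblB m := by
  induction m, h3 using Nat.le_induction with
  | base =>
    rw [PySem.List.pyRange_one_eq_nil (by norm_num)]
    decide
  | succ m hm ih =>
    rw [show ((m + 1 : Nat) : Int) + 1 = ((m : Nat) : Int) + 1 + 1 from by push_cast; ring]
    rw [PySem.List.pyRange_one_succ_right (by exact_mod_cast by omega)]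
    rw [List.foldl_append, ih]
    simp only [List.foldl_cons, List.foldl_nil]
    rw [show ((m : Nat) : Int) + 1 = ((m + 1 : Nat) : Int) from by push_cast; ring]
    exact pv_B_step m hm

theorem pv_B_eval (n : Int) (h : ¬ n < 4) : maxA_alt n = pvB n.toNat := by
  have h4 : 4 ≤ n.toNat := by omega
  unfold maxA_alt
  rw [if_neg h]
  simp only []
  rw [show n + 1 = ((n.toNat : Nat) : Int) + 1 from by omega]
  rw [pv_B_loop n.toNat (by omega)]
  rw [show n = ((n.toNat : Nat) : Int) from by omega, PySem.List.pyGetD_natCast]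
  rfl

-- ---- port A = pvTblA ----
theorem pv_A_inner (c : Int) (i : Nat) (ks : List Nat) :
    ∀ (l : List Int), i < l.length → (∀ k ∈ ks, k ≠ i) →
    ks.foldl (fun l2 k => l2.set i (max (l2.getD i 0) (l2.getD k 0 * (c - (k : Int) - 1)))) l
    = l.set i (ks.foldl (fun acc k => max acc (l.getD k 0 * (c - (k : Int) - 1))) (l.getD i 0)) := by
  induction ks with
  | nil =>
    intro l hl _
    simpa using (pv_set_getD_self hl).symm
  | cons k ks ih =>
    intro l hl hk
    simp only [List.foldl_cons]
    rw [ih (l.set i _) (by simpa using hl) (fun k' h' => hk k' (by simp [h']))]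
    rw [List.set_set]
    congr 1
    rw [pv_getD_set_self hl]
    apply PySem.List.foldl_congr_mem
    intro acc k' hk'
    rw [pv_getD_set_ne (Ne.symm (hk k' (by simp [hk'])))]

theorem pv_A_init (N : Nat) (h : 4 ≤ N) :
    (PySem.List.pyRange 0 4 1).foldl (fun l i => PySem.List.pySetD l i i)
      (List.replicate (N + 1) (0 : Int))
    = pvTblA 3 ++ List.replicate (N - 3) 0 := by
  have hrep : List.replicate (N + 1) (0 : Int) = [0, 0, 0, 0] ++ List.replicate (N - 3) 0 := by
    rw [show N + 1 = 4 + (N - 3) from by omega, List.replicate_add]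
    rfl
  have hr : PySem.List.pyRange 0 4 1 = [0, 1, 2, 3] := by decide
  rw [hrep, hr]
  simp only [List.foldl_cons, List.foldl_nil]
  norm_num [PySem.List.pySetD_of_nonneg, List.set]
  rfl

theorem pv_A_step (N m : Nat) (h3 : 3 ≤ m) (hmN : m < N) :
    (PySem.List.pyRange 1 ((m + 1 : Nat) : Int) 1).foldl
      (fun l2 k => PySem.List.pySetD l2 ((m + 1 : Nat) : Int)
        (max (PySem.List.pyGetD l2 ((m + 1 : Nat) : Int) 0)
          (PySem.List.pyGetD l2 k 0 * (((m + 1 : Nat) : Int) - k - 1))))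
      (PySem.List.pySetD (pvTblA m ++ List.replicate (N - m) 0) ((m + 1 : Nat) : Int)
        (PySem.List.pyGetD (pvTblA m ++ List.replicate (N - m) 0) (((m + 1 : Nat) : Int) - 1) 0 + 1))
    = pvTblA (m + 1) ++ List.replicate (N - (m + 1)) 0 := by
  have hlt : m < (pvTblA m ++ List.replicate (N - m) (0 : Int)).length := by
    simp [pv_len_tblA]; omega
  have hlen : m + 1 < (pvTblA m ++ List.replicate (N - m) (0 : Int)).length := by
    simp [pv_len_tblA]; omega
  rw [show (((m + 1 : Nat) : Int) - 1) = ((m : Nat) : Int) from by push_cast; ring,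
      PySem.List.pyGetD_natCast, PySem.List.pySetD_natCast]
  rw [pv_pyRange_map _ _ (by omega), List.foldl_map]
  simp only [PySem.List.pySetD_natCast, PySem.List.pyGetD_natCast]
  rw [show ((1 : Int)).toNat = 1 from rfl,
      show ((((m + 1 : Nat) : Int)) - 1).toNat = m from by omega]
  rw [pv_A_inner ((m + 1 : Nat) : Int) (m + 1) (List.range' 1 m) _
      (by simpa using hlen)
      (by intro k hk; rw [List.mem_range'_1] at hk; omega)]
  rw [List.set_set, pv_getD_set_self hlen]
  have hcongr : (List.range' 1 m).foldl
      (fun acc k => max acc (((pvTblA m ++ List.replicate (N - m) (0 : Int)).set (m + 1)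
        ((pvTblA m ++ List.replicate (N - m) (0 : Int)).getD m 0 + 1)).getD k 0
          * (((m + 1 : Nat) : Int) - (k : Int) - 1)))
      ((pvTblA m ++ List.replicate (N - m) (0 : Int)).getD m 0 + 1)
      = pvInner (fun k => (pvTblA m).getD k 0) 1 (m + 1) := by
    unfold pvInner
    rw [show (m + 1) - 1 = m from by omega]
    have hgm : (pvTblA m ++ List.replicate (N - m) (0 : Int)).getD m 0 = (pvTblA m).getD m 0 :=
      pv_getD_append _ (by rw [pv_len_tblA]; omega)
    rw [hgm]
    exact PySem.List.foldl_congr_mem _ _ _ _ (by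
      intro acc k hk
      rw [List.mem_range'_1] at hk
      rw [pv_getD_set_ne (by omega), pv_getD_append _ (by rw [pv_len_tblA]; omega)])
  rw [hcongr]
  have hsplit : List.replicate (N - m) (0 : Int)
      = (0 : Int) :: List.replicate (N - (m + 1)) 0 := by
    rw [show N - m = (N - (m + 1)) + 1 from by omega, List.replicate_succ]
  rw [show pvTblA (m + 1) = pvTblA m ++ [if m + 1 < 4 then ((m : Int) + 1)
      else pvInner (fun k => (pvTblA m).getD k 0) 1 (m + 1)] from rfl, if_neg (by omega)]
  rw [hsplit]
  rw [show m + 1 = (pvTblA m).length + 0 from by rw [pv_len_tblA]]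
  rw [List.set_append]
  simp [pv_len_tblA]

theorem pv_A_loop (N : Nat) (_hN : 4 ≤ N) :
    ∀ m, 3 ≤ m → m ≤ N →
    (PySem.List.pyRange 4 ((m : Int) + 1) 1).foldl
      (fun l i =>
        (PySem.List.pyRange 1 i 1).foldl
          (fun l2 k => PySem.List.pySetD l2 i
            (max (PySem.List.pyGetD l2 i 0) (PySem.List.pyGetD l2 k 0 * (i - k - 1))))
          (PySem.List.pySetD l i (PySem.List.pyGetD l (i - 1) 0 + 1)))
      (pvTblA 3 ++ List.replicate (N - 3) 0)
    = pvTblA m ++ List.replicate (N - m) 0 := by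
  intro m h3
  induction m, h3 using Nat.le_induction with
  | base =>
    intro _
    rw [PySem.List.pyRange_one_eq_nil (by omega)]
    rfl
  | succ m hm ih =>
    intro hmN
    rw [show ((m + 1 : Nat) : Int) + 1 = ((m : Nat) : Int) + 1 + 1 from by push_cast; ring]
    rw [PySem.List.pyRange_one_succ_right (by omega)]
    rw [List.foldl_append, ih (by omega)]
    simp only [List.foldl_cons, List.foldl_nil]
    rw [show ((m : Nat) : Int) + 1 = ((m + 1 : Nat) : Int) from by push_cast; ring]
    exact pv_A_step N m hm (by omega)

theorem pv_A_eval (n : Int) (h : ¬ n < 4) : maxA n = pvA n.toNat := by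
  have h4 : 4 ≤ n.toNat := by omega
  unfold maxA
  rw [if_neg h]
  simp only []
  rw [show (n + 1).toNat = n.toNat + 1 from by omega]
  rw [pv_A_init n.toNat h4]
  rw [show n + 1 = ((n.toNat : Nat) : Int) + 1 from by omega]
  rw [pv_A_loop n.toNat h4 n.toNat (by omega) (le_refl _)]
  rw [show n.toNat - n.toNat = 0 from by omega]
  simp only [List.replicate_zero, List.append_nil]
  rw [show n = ((n.toNat : Nat) : Int) from by omega, PySem.List.pyGetD_natCast]
  rfl

-- ===== VERDICT (by name: the statement is the Claim_ definition above) =====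
theorem maxA_spec : Claim_equal_maxA := by
  unfold Claim_equal_maxA Spec_maxA
  intro n _
  by_cases h : n < 4
  · unfold maxA maxA_alt
    rw [if_pos h, if_pos h]
  · rw [pv_A_eval n h, pv_B_eval n h]
    exact pvA_eq_pvB n.toNat
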